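-- pv_equiv track=rewrite | github.com/zorofrizzy/Recipe_Generator_COMP_680 | Code/query_faiss.py | ranked_results
-- ===== SOURCE A (Python) =====
-- def ranked_results(results, user_input):
--     """
--     The results are ranked based on how many user input ingredients appear as substrings in each recipe's ingredient list.
--     """
--     # Preprocess user input: Remove spaces, hyphens, and convert to lowercase
--     user_input = [ingredient.lower().replace(" ", "").replace("-", "") for ingredient in user_input]
--
--     # Initialize a dictionary to store match counts
--     ranked_idx = {}
--     for idx, result in enumerate(results):
--         # Extract and preprocess the ingredient list from the result
--         ingredient_list = result[-2]  # Assuming ingredients are in the second-to-last column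
--         ingredient_string = "".join(ingredient_list).lower().replace(" ", "").replace("-", "")
--
--         # Count matches using substring search
--         match_counter = sum(1 for user_ingredient in user_input if user_ingredient in ingredient_string)
--         ranked_idx[idx] = match_counter
--
--     # Sort the results by match count in descending order
--     sorted_indices = sorted(ranked_idx.keys(), key=lambda x: ranked_idx[x], reverse=True)
--
--     # Return the sorted results
--     sorted_results = [results[i] for i in sorted_indices]
--     return sorted_results
-- ===== SOURCE B (Python) =====
-- def ranked_results(results, user_input):
--     """
--     Same ranking, no sort: bucket recipes by match count and emit counts high-to-low.
--     """
--     user_input = [ingredient.lower().replace(" ", "").replace("-", "") for ingredient in user_input]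
--
--     def score(result):
--         s = "".join(result[-2]).lower().replace(" ", "").replace("-", "")
--         return sum(1 for u in user_input if u in s)
--
--     scored = [(recipe, score(recipe)) for recipe in results]
--
--     out = []
--     for c in range(len(user_input), -1, -1):
--         for recipe, k in scored:
--             if k == c:
--                 out.append(recipe)
--     return out
-- ===== Notes on version B (the rewrite author's own statement) =====
-- stated objective: alternative
-- what changed: Replaces the dict of index scores plus stable reverse comparison sort with a sort-free counting pass: each recipe is scored once, then the output is emitted by scanning counts from len(user_input) down to 0 and appending the recipes with that count in original order.
import Mathlib
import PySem

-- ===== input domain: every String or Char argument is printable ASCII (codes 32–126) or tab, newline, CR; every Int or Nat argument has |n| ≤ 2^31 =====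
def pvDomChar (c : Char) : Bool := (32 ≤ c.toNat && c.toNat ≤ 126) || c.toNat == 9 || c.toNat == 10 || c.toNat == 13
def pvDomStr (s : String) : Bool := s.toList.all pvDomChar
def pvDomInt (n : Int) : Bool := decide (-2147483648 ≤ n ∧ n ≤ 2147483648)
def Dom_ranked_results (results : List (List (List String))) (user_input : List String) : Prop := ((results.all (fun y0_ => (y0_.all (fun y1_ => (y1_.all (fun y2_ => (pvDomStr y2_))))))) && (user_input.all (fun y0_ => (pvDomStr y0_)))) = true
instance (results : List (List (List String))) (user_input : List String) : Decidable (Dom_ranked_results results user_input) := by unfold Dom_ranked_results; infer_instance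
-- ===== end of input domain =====

-- B replaces A's score dict + stable reverse comparison sort by a sort-free counting pass
-- (emit recipes with count m, then m-1, …, then 0, each group in original order); same return value.

-- ===== PORT A =====
def ranked_results (results : List (List (List String))) (user_input : List String) : List (List (List String)) :=
  let ui := user_input.map (fun ingredient =>
    PySem.Str.replace (PySem.Str.replace (PySem.Str.lower ingredient) " " "") "-" "")
  let ranked_idx : PySem.Dict Int Int :=
    (PySem.List.enumerate results 0).foldl (fun d p =>
      let ingredient_string := PySem.Str.replace (PySem.Str.replace
        (PySem.Str.lower (PySem.Str.join "" (PySem.List.pyGetD p.2 (-2) []))) " " "") "-" ""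
      d.insert p.1 ((ui.filter (fun u => PySem.Str.isIn u ingredient_string)).length : Int))
      PySem.Dict.empty
  let sorted_indices := PySem.List.sorted ranked_idx.keys (fun x => ranked_idx.getD x 0) true
  sorted_indices.map (fun i => PySem.List.pyGetD results i [])

-- ===== PORT B =====
def pvClean (s : String) : String :=
  PySem.Str.replace (PySem.Str.replace (PySem.Str.lower s) " " "") "-" ""

def pvScore (ui : List String) (result : List (List String)) : Int :=
  let s := pvClean (PySem.Str.join "" (PySem.List.pyGetD result (-2) []))
  (ui.countP (fun u => PySem.Str.isIn u s) : Int)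

def ranked_results_alt (results : List (List (List String))) (user_input : List String) : List (List (List String)) :=
  let ui := user_input.map pvClean
  let scored := results.map (fun recipe => (recipe, pvScore ui recipe))
  (PySem.List.pyRange (ui.length : Int) (-1) (-1)).foldl
    (fun out c => scored.foldl (fun out p => if p.2 == c then out ++ [p.1] else out) out) []

-- ===== PRECONDITION & SPEC =====
-- Pre_ excludes exactly the inputs where result[-2] raises IndexError (a recipe row with
-- fewer than 2 columns); both A and B raise there.
def Pre_ranked_results (results : List (List (List String))) (user_input : List String) : Prop :=
  ∀ r ∈ results, 2 ≤ r.length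
instance (results : List (List (List String))) (user_input : List String) : Decidable (Pre_ranked_results results user_input) := by unfold Pre_ranked_results; infer_instance

def pvWitness_ranked_results : List (List (List String)) × List String :=
  ([[["egg"], ["salt"]], [["flour", "Egg"], ["pepper"]]], ["egg", "Salt"])

def Spec_ranked_results (results : List (List (List String))) (user_input : List String) (out : List (List (List String))) : Prop := out = ranked_results_alt results user_input
instance (results : List (List (List String))) (user_input : List String) (out : List (List (List String))) : Decidable (Spec_ranked_results results user_input out) := by unfold Spec_ranked_results; infer_instance

-- ===== CLAIM (what is proved, stated in full; the proofs are below) =====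
def Claim_equal_ranked_results : Prop := ∀ (results : List (List (List String))) (user_input : List String), Dom_ranked_results results user_input → Pre_ranked_results results user_input → Spec_ranked_results results user_input (ranked_results results user_input)

-- ===== LEMMAS AND PROOFS =====

theorem insertBy_cons_eq {α : Type} (before : α → α → Bool) (x y : α) (ys : List α) :
    PySem.List.insertBy before x (y :: ys) =
      if before x y then x :: y :: ys else y :: PySem.List.insertBy before x ys := rfl

theorem insertBy_append_not {α : Type} (before : α → α → Bool) (x : α) (b l : List α)
    (h : ∀ y ∈ b, before x y = false) :
    PySem.List.insertBy before x (b ++ l) = b ++ PySem.List.insertBy before x l := by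
  induction b with
  | nil => simp
  | cons y b ih =>
    have hy : before x y = false := h y (by simp)
    simp only [List.cons_append, insertBy_cons_eq, hy, Bool.false_eq_true, if_false]
    rw [ih (fun z hz => h z (by simp [hz]))]

-- inserting x into a bucket-flattened list (buckets in strictly decreasing key order)
-- appends x at the end of its own bucket
theorem insertBy_bucket {α : Type} (key : α → Int) (cs : List Int)
    (hcs : cs.Pairwise (fun a b => b < a)) (ys : List α) (x : α) (hx : key x ∈ cs) :
    PySem.List.insertBy (fun a b => decide (key b < key a)) x
        (cs.flatMap (fun c => ys.filter (fun y => key y == c)))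
      = cs.flatMap (fun c => (ys ++ [x]).filter (fun y => key y == c)) := by
  induction cs with
  | nil => simp at hx
  | cons c cs ih =>
    have hlt : ∀ c' ∈ cs, c' < c := by
      intro c' hc'; exact (List.pairwise_cons.mp hcs).1 c' hc'
    have hbkey : ∀ y ∈ ys.filter (fun y => key y == c), key y = c := by
      intro y hy
      exact beq_iff_eq.mp (List.mem_filter.mp hy).2
    rcases List.mem_cons.mp hx with hxc | hxcs
    · -- key x = c : x lands at the end of the head bucket
      have hrest : ∀ z ∈ cs.flatMap (fun c' => ys.filter (fun y => key y == c')),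
          decide (key z < key x) = true := by
        intro z hz
        rcases List.mem_flatMap.mp hz with ⟨c', hc', hzf⟩
        have : key z = c' := beq_iff_eq.mp (List.mem_filter.mp hzf).2
        simp [this, hxc]
        exact hlt c' hc'
      have hb : ∀ y ∈ ys.filter (fun y => key y == c),
          (fun a b => decide (key b < key a)) x y = false := by
        intro y hy
        simp [hbkey y hy, hxc]
      rw [List.flatMap_cons, insertBy_append_not _ _ _ _ hb]
      have htail : PySem.List.insertBy (fun a b => decide (key b < key a)) x
          (cs.flatMap (fun c' => ys.filter (fun y => key y == c')))
          = x :: cs.flatMap (fun c' => ys.filter (fun y => key y == c')) := by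
        cases hrec : cs.flatMap (fun c' => ys.filter (fun y => key y == c')) with
        | nil => rfl
        | cons z zs =>
          have hz : decide (key z < key x) = true := by
            apply hrest; rw [hrec]; simp
          rw [insertBy_cons_eq]
          simp [hz]
      rw [htail, List.flatMap_cons]
      have hhead : (ys ++ [x]).filter (fun y => key y == c)
          = ys.filter (fun y => key y == c) ++ [x] := by
        rw [List.filter_append]
        simp [hxc]
      have htb : ∀ c' ∈ cs, (ys ++ [x]).filter (fun y => key y == c')
          = ys.filter (fun y => key y == c') := by
        intro c' hc'
        rw [List.filter_append]
        have : key x ≠ c' := by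
          have := hlt c' hc'; omega
        simp [this]
      rw [List.flatMap_congr (fun c' hc' => htb c' hc'), hhead]
      simp
    · -- key x belongs to a later bucket
      have hxlt : key x < c := hlt _ hxcs
      have hb : ∀ y ∈ ys.filter (fun y => key y == c),
          (fun a b => decide (key b < key a)) x y = false := by
        intro y hy
        have := hbkey y hy
        simp [this]; omega
      rw [List.flatMap_cons, insertBy_append_not _ _ _ _ hb,
        ih (List.pairwise_cons.mp hcs).2 hxcs, List.flatMap_cons]
      have hhead : (ys ++ [x]).filter (fun y => key y == c)
          = ys.filter (fun y => key y == c) := by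
        rw [List.filter_append]
        have : key x ≠ c := by omega
        simp [this]
      rw [hhead]

theorem flatMap_congr_bucket {α : Type} (cs : List Int) (f g : Int → List α)
    (h : ∀ c ∈ cs, f c = g c) : cs.flatMap f = cs.flatMap g :=
  List.flatMap_congr h

-- Python's stable reverse sort by an Int key, when every key lies in the strictly
-- decreasing list cs, is exactly the bucket concatenation over cs.
theorem sorted_rev_bucket {α : Type} (xs : List α) (key : α → Int) (cs : List Int)
    (hcs : cs.Pairwise (fun a b => b < a)) (hmem : ∀ x ∈ xs, key x ∈ cs) :
    PySem.List.sorted xs key true = cs.flatMap (fun c => xs.filter (fun y => key y == c)) := by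
  rw [PySem.List.sorted_rev_eq_foldl_insertBy]
  induction xs using List.reverseRecOn with
  | nil => simp
  | append_singleton ys x ih =>
    rw [List.foldl_append, List.foldl_cons, List.foldl_nil,
      ih (fun z hz => hmem z (by simp [hz]))]
    exact insertBy_bucket key cs hcs ys x (hmem x (by simp))

theorem ranked_results_spec_aux (results : List (List (List String))) (user_input : List String) :
    ranked_results results user_input = ranked_results_alt results user_input := by
  set ui := user_input.map pvClean with hui
  set n : Nat := results.length with hn
  set d : PySem.Dict Int Int :=
    (PySem.List.enumerate results 0).foldl (fun d p =>
      d.insert p.1 ((ui.filter (fun u => PySem.Str.isIn u (PySem.Str.replace (PySem.Str.replace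
        (PySem.Str.lower (PySem.Str.join "" (PySem.List.pyGetD p.2 (-2) []))) " " "") "-" ""))).length : Int))
      PySem.Dict.empty with hd
  -- the per-recipe value A stores is B's score
  have hval : ∀ r : List (List String),
      ((ui.filter (fun u => PySem.Str.isIn u (PySem.Str.replace (PySem.Str.replace
        (PySem.Str.lower (PySem.Str.join "" (PySem.List.pyGetD r (-2) []))) " " "") "-" ""))).length : Int)
      = pvScore ui r := by
    intro r
    simp [pvScore, pvClean, List.countP_eq_length_filter]
  -- the dict built by A's loop: fresh increasing keys, so items append in order
  have hitems : d.items = (PySem.List.enumerate results 0).map (fun p => (p.1, pvScore ui p.2)) := by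
    rw [hd]
    have := PySem.Dict.items_foldl_insert_fresh (PySem.List.enumerate results 0)
      (fun p => p.1)
      (fun p => ((ui.filter (fun u => PySem.Str.isIn u (PySem.Str.replace (PySem.Str.replace
        (PySem.Str.lower (PySem.Str.join "" (PySem.List.pyGetD p.2 (-2) []))) " " "") "-" ""))).length : Int))
      PySem.Dict.empty
      (by intro a _; exact PySem.Dict.contains_empty _)
      (by rw [PySem.List.map_fst_enumerate]; exact PySem.List.nodup_pyRange_one _ _)
    rw [this]
    simp only [show (PySem.Dict.empty : PySem.Dict Int Int).items = [] from rfl, List.nil_append]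
    exact List.map_congr_left (fun p _ => by rw [hval p.2])
  have hitems' : d.items = (PySem.List.pyRange 0 (n : Int)).map
      (fun j => (j, pvScore ui (PySem.List.pyGetD results j []))) := by
    rw [hitems, PySem.List.enumerate_eq_map_pyRange results []]
    simp [List.map_map, hn, Function.comp]
  have hkeys : d.keys = PySem.List.pyRange 0 (n : Int) := by
    show d.items.map (fun p => p.1) = _
    rw [hitems']
    simp [List.map_map, Function.comp_def]
  have hnodup : d.keys.Nodup := by rw [hkeys]; exact PySem.List.nodup_pyRange_one _ _
  have hgetD : ∀ i ∈ PySem.List.pyRange 0 (n : Int),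
      d.getD i 0 = pvScore ui (PySem.List.pyGetD results i []) := by
    intro i hi
    apply PySem.Dict.getD_of_mem_items d _ hnodup
    rw [hitems']
    exact List.mem_map.mpr ⟨i, hi, rfl⟩
  set m : Int := (ui.length : Int) with hm
  set cs : List Int := PySem.List.pyRange m (-1) (-1) with hcs
  have hcs_pw : cs.Pairwise (fun a b => b < a) := by
    rw [hcs, PySem.List.pyRange_neg_one_eq_reverse]
    rw [List.pairwise_reverse]
    exact PySem.List.pairwise_lt_pyRange_one _ _
  have hscore_mem : ∀ r : List (List String), pvScore ui r ∈ cs := by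
    intro r
    rw [hcs, PySem.List.mem_pyRange_neg_one]
    have h0 : pvScore ui r = ((ui.countP (fun u =>
        PySem.Str.isIn u (pvClean (PySem.Str.join "" (PySem.List.pyGetD r (-2) []))))) : Int) := rfl
    have h1 := List.countP_le_length
      (p := fun u => PySem.Str.isIn u (pvClean (PySem.Str.join "" (PySem.List.pyGetD r (-2) [])))) (l := ui)
    rw [h0, hm]
    omega
  have hmem : ∀ i ∈ PySem.List.pyRange 0 (n : Int), d.getD i 0 ∈ cs := by
    intro i hi
    rw [hgetD i hi]
    exact hscore_mem _
  have hA : ranked_results results user_input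
      = (PySem.List.sorted d.keys (fun x => d.getD x 0) true).map
          (fun i => PySem.List.pyGetD results i []) := rfl
  have hB : ranked_results_alt results user_input
      = cs.foldl (fun out c =>
          (results.map (fun recipe => (recipe, pvScore ui recipe))).foldl
            (fun out p => if p.2 == c then out ++ [p.1] else out) out) [] := rfl
  rw [hA, hB]
  -- A's side: stable reverse sort = bucket concatenation
  rw [hkeys, sorted_rev_bucket _ _ cs hcs_pw hmem]
  -- B's side: the two nested loops are the same bucket concatenation
  have hinner : ∀ (c : Int) (acc : List (List (List String))),
      (results.map (fun recipe => (recipe, pvScore ui recipe))).foldl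
        (fun out p => if p.2 == c then out ++ [p.1] else out) acc
      = acc ++ (results.filter (fun r => pvScore ui r == c)) := by
    intro c acc
    rw [PySem.List.foldl_append_if (fun (p : List (List String) × Int) => p.2 == c)
      (fun (p : List (List String) × Int) => p.1)]
    rw [List.filter_map]
    simp [Function.comp_def]
  have houter :
      cs.foldl (fun out c =>
        (results.map (fun recipe => (recipe, pvScore ui recipe))).foldl
          (fun out p => if p.2 == c then out ++ [p.1] else out) out) []
      = cs.flatMap (fun c => results.filter (fun r => pvScore ui r == c)) := by
    have : (fun (out : List (List (List String))) (c : Int) =>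
        (results.map (fun recipe => (recipe, pvScore ui recipe))).foldl
          (fun out p => if p.2 == c then out ++ [p.1] else out) out)
        = (fun out c => out ++ (results.filter (fun r => pvScore ui r == c))) := by
      funext out c; exact hinner c out
    rw [this, PySem.List.foldl_append_eq_flatMap]
    simp
  rw [houter, List.map_flatMap]
  apply flatMap_congr_bucket
  intro c hc
  -- A's bucket for count c is B's bucket for count c
  rw [List.filter_congr (fun i hi => by
    rw [hgetD i hi] : ∀ i ∈ PySem.List.pyRange 0 (n : Int),
      ((d.getD i 0 == c) : Bool) = ((pvScore ui (PySem.List.pyGetD results i []) == c) : Bool))]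
  rw [show (fun i => pvScore ui (PySem.List.pyGetD results i []) == c)
      = ((fun r => pvScore ui r == c) ∘ (fun i => PySem.List.pyGetD results i [])) from rfl,
    ← List.filter_map, hn]
  rw [PySem.List.map_pyGetD_pyRange_zero' results []]

-- ===== VERDICT (by name: the statement is the Claim_ definition above) =====
theorem ranked_results_spec : Claim_equal_ranked_results := by
  intro results user_input _ _
  show _ = _
  exact ranked_results_spec_aux results user_input
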